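-- pv_equiv track=rewrite | github.com/SnehithReddy/maxmllab | maxmllab.py | distinctCharacter
-- ===== SOURCE A (Python) =====
-- def distinctCharacter (S,len):
--     distinict_count = [1]*len
--     dic ={}
--     dic[S[0]]=1
--
--     for each_index in range(1,len):
--         if S[each_index] not in dic:
--             distinict_count[each_index]=distinict_count[each_index-1]+1
--             dic[S[each_index]] = distinict_count[each_index]
--
--         else:
--             distinict_count[each_index]=distinict_count[each_index-1]
--
--     return distinict_count
-- ===== SOURCE B (Python) =====
-- def distinctCharacter(S, len):
--     # Pass 1: 0/1 indicator of "first occurrence" per index.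
--     seen = set()
--     ind = [0] * len
--     for i in range(len):
--         if S[i] not in seen:
--             seen.add(S[i])
--             ind[i] = 1
--     # Pass 2: branch-free running prefix sum of the indicators.
--     res = [0] * len
--     total = 0
--     for i in range(len):
--         total += ind[i]
--         res[i] = total
--     return res
-- ===== Notes on version B (the rewrite author's own statement) =====
-- stated objective: alternative
-- what changed: B splits the work into a first-occurrence 0/1 indicator pass over a set plus a separate branch-free prefix-sum pass, instead of A's single loop carrying a dict of counts and reading back the previous output cell.
import Mathlib
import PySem

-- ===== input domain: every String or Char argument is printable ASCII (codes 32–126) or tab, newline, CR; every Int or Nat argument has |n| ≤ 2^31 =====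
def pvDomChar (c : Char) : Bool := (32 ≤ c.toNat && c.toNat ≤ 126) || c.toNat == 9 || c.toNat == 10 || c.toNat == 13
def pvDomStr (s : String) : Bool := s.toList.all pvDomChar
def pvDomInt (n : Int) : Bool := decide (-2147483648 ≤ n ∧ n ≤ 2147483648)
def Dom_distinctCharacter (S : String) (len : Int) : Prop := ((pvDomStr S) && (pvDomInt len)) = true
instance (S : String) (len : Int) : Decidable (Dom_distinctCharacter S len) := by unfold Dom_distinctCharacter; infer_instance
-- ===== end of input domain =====

-- B replaces A's single dict-of-counts loop by a first-occurrence indicator pass plus a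
-- separate branch-free prefix-sum pass (alternative decomposition, same cost).
-- ===== PORT A =====
def distinctCharacter (S : String) (len : Int) : List Int :=
  let dc0 : List Int := List.replicate len.toNat 1            -- [1]*len
  match PySem.Str.pyGet? S 0 with                             -- S[0] (none = IndexError, outside Pre_)
  | none => []
  | some c0 =>
    let dic0 : PySem.Dict Char Int := PySem.Dict.insert PySem.Dict.empty c0 1
    let st := (PySem.List.pyRange 1 len 1).foldl (fun (st : List Int × PySem.Dict Char Int) i =>
      match PySem.Str.pyGet? S i with
      | none => st                                            -- IndexError, outside Pre_
      | some c =>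
        if st.2.contains c = false then                       -- 'S[i] not in dic'
          (PySem.List.pySetD st.1 i (PySem.List.pyGetD st.1 (i-1) 0 + 1),
           st.2.insert c (PySem.List.pyGetD st.1 (i-1) 0 + 1))
        else
          (PySem.List.pySetD st.1 i (PySem.List.pyGetD st.1 (i-1) 0), st.2))
      (dc0, dic0)
    st.1

-- ===== PORT B =====
def distinctCharacter_alt (S : String) (len : Int) : List Int :=
  -- pass 1: first-occurrence indicator
  let st := (PySem.List.pyRange 0 len 1).foldl (fun (st : List Int × PySem.Set Char) i =>
      match PySem.Str.pyGet? S i with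
      | none => st
      | some c =>
        if PySem.Set.contains st.2 c = false then             -- 'S[i] not in seen'
          (PySem.List.pySetD st.1 i 1, PySem.Set.add st.2 c)
        else st)
    (List.replicate len.toNat 0, PySem.Set.empty)
  -- pass 2: running prefix sum
  let res := (PySem.List.pyRange 0 len 1).foldl (fun (rt : List Int × Int) i =>
      let t := rt.2 + PySem.List.pyGetD st.1 i 0
      (PySem.List.pySetD rt.1 i t, t))
    (List.replicate len.toNat 0, 0)
  res.1

-- ===== PRECONDITION & SPEC =====
-- Pre_ is exactly where Python A returns: S nonempty (dic[S[0]]) and len ≤ |S| (S[i] for i < len).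
def Pre_distinctCharacter (S : String) (len : Int) : Prop :=
  S.toList ≠ [] ∧ len ≤ (S.toList.length : Int)
instance (S : String) (len : Int) : Decidable (Pre_distinctCharacter S len) := by
  unfold Pre_distinctCharacter; infer_instance
def pvWitness_distinctCharacter : String × Int := ("abacc", 5)

def Spec_distinctCharacter (S : String) (len : Int) (out : List Int) : Prop := out = distinctCharacter_alt S len
instance (S : String) (len : Int) (out : List Int) : Decidable (Spec_distinctCharacter S len out) := by unfold Spec_distinctCharacter; infer_instance

-- ===== CLAIM (what is proved, stated in full; the proofs are below) =====
def Claim_equal_distinctCharacter : Prop := ∀ (S : String) (len : Int), Dom_distinctCharacter S len → Pre_distinctCharacter S len → Spec_distinctCharacter S len (distinctCharacter S len)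

-- ===== LEMMAS AND PROOFS =====

def scnt (cs : List Char) (m : ℕ) : Int := ((PySem.Set.ofList (cs.take m)).length : Int)

theorem scnt_succ (cs : List Char) (m : ℕ) (hm : m < cs.length) :
    scnt cs (m+1) = scnt cs m + (if (cs.take m).contains cs[m] then 0 else 1) := by
  unfold scnt
  rw [List.take_succ, List.getElem?_eq_getElem hm]
  rw [PySem.Set.ofList_eq_foldl, List.foldl_append, ← PySem.Set.ofList_eq_foldl]
  simp only [Option.toList_some, List.foldl_cons, List.foldl_nil]
  by_cases h : cs[m] ∈ cs.take m
  · have hc : (PySem.Set.ofList (cs.take m)).contains cs[m] = true := by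
      simp [PySem.Set.mem_ofList, h]
    simp [PySem.Set.add, h]
  · have hc : (PySem.Set.ofList (cs.take m)).contains cs[m] = false := by
      simp [PySem.Set.mem_ofList, h]
    simp [PySem.Set.add, h]

theorem step_set (n m : ℕ) (hm : m < n) (g : ℕ → Int) (e v : Int) (hv : v = g m) :
    ((List.range n).map (fun i => if i < m then g i else e)).set m v
    = (List.range n).map (fun i => if i < m+1 then g i else e) := by
  apply List.ext_getElem
  · simp
  · intro k hk1 hk2
    simp only [List.getElem_set, List.getElem_map, List.getElem_range]
    simp only [List.length_set, List.length_map, List.length_range] at hk1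
    rcases lt_trichotomy k m with h | h | h
    · simp [h, Nat.lt_succ_of_lt h, Nat.ne_of_lt' h]
    · subst h; simp [hv]
    · have h1 : ¬ k < m := by omega
      have h2 : ¬ k < m + 1 := by omega
      simp [h1, h2]; omega

theorem getD_map_range' (n k : ℕ) (hk : k < n) (f : ℕ → Int) :
    ((List.range n).map f).getD k 0 = f k := by
  rw [List.getD_eq_getElem?_getD]
  simp [hk]

theorem contains_take_succ (cs : List Char) (m : ℕ) (hm : m < cs.length) (x : Char) :
    (cs.take (m+1)).contains x = ((cs.take m).contains x || (x == cs[m])) := by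
  have e : cs.take (m+1) = cs.take m ++ [cs[m]] := by
    rw [← List.take_concat_get hm, List.concat_eq_append]
  have h : x ∈ cs.take (m+1) ↔ x ∈ cs.take m ∨ x = cs[m] := by
    rw [e]; simp only [List.mem_append, List.mem_singleton]
  have hmem : cs[m] ∈ cs.take (m+1) := by rw [e]; exact List.mem_append_right _ (List.mem_singleton_self _)
  by_cases h1 : x ∈ cs.take m <;> by_cases h2 : x = cs[m] <;>
    simp [h, h1, h2, hmem]

theorem A_loop (S : String) (n : ℕ) (hn : n ≤ S.toList.length) :
    ∀ m : ℕ, 1 ≤ m → m ≤ n → ∀ d0 : PySem.Dict Char Int,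
    (∀ x, d0.contains x = (S.toList.take 1).contains x) →
    ∃ d : PySem.Dict Char Int,
      (PySem.List.pyRange 1 (m : Int) 1).foldl
        (fun (st : List Int × PySem.Dict Char Int) i =>
          match PySem.Str.pyGet? S i with
          | none => st
          | some c =>
            if st.2.contains c = false then
              (PySem.List.pySetD st.1 i (PySem.List.pyGetD st.1 (i-1) 0 + 1),
               st.2.insert c (PySem.List.pyGetD st.1 (i-1) 0 + 1))
            else
              (PySem.List.pySetD st.1 i (PySem.List.pyGetD st.1 (i-1) 0), st.2))
        ((List.range n).map (fun i => if i < 1 then scnt S.toList (i+1) else 1), d0)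
      = ((List.range n).map (fun i => if i < m then scnt S.toList (i+1) else 1), d)
      ∧ ∀ x, d.contains x = (S.toList.take m).contains x := by
  intro m
  induction m with
  | zero => omega
  | succ m ih =>
    intro _ hm d0 hd0
    by_cases h1 : 1 ≤ m
    · -- step case: m ≥ 1, process index m
      obtain ⟨d, hfold, hd⟩ := ih h1 (by omega) d0 hd0
      have hrange : PySem.List.pyRange 1 ((m+1 : ℕ) : Int) 1
          = PySem.List.pyRange 1 (m : Int) 1 ++ [(m : Int)] := by
        push_cast
        exact PySem.List.pyRange_one_succ_right (by exact_mod_cast h1)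
      rw [hrange, List.foldl_append, hfold]
      have hmlt : m < S.toList.length := by omega
      have hget : PySem.Str.pyGet? S ((m : ℕ) : Int) = some (S.toList[m]) := by
        simp [List.getElem?_eq_getElem hmlt]
      have hsub : ((m : ℕ) : Int) - 1 = ((m - 1 : ℕ) : Int) := by omega
      have hprev : PySem.List.pyGetD
          ((List.range n).map (fun i => if i < m then scnt S.toList (i+1) else 1)) (((m:ℕ):Int) - 1) 0
          = scnt S.toList m := by
        rw [hsub, PySem.List.pyGetD_natCast, getD_map_range' n (m-1) (by omega)]
        have : m - 1 < m := by omega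
        simp [this]
        congr 1; omega
      simp only [List.foldl_cons, List.foldl_nil, hget]
      by_cases hc : S.toList[m] ∈ S.toList.take m
      · -- already seen
        have hcb : d.contains S.toList[m] = true := by
          rw [hd]; simp [hc]
        refine ⟨d, ?_, ?_⟩
        · rw [hcb, if_neg (by simp)]
          simp only [hprev, PySem.List.pySetD_natCast]
          rw [step_set n m (by omega) _ 1 _ (by rw [scnt_succ S.toList m hmlt]; simp [hc])]
        · intro x
          rw [contains_take_succ S.toList m hmlt x, hd]
          cases hx : (x == S.toList[m])
          · simp
          · have hx' : x = S.toList[m] := by simpa using hx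
            subst hx'
            simp [hc]
      · -- new character
        have hcb : d.contains S.toList[m] = false := by
          rw [hd]; simp [hc]
        refine ⟨d.insert S.toList[m] (scnt S.toList m + 1), ?_, ?_⟩
        · rw [hcb, if_pos rfl]
          simp only [hprev, PySem.List.pySetD_natCast]
          rw [step_set n m (by omega) _ 1 _ (by rw [scnt_succ S.toList m hmlt]; simp [hc])]
        · intro x
          rw [PySem.Dict.contains_insert, hd, contains_take_succ S.toList m hmlt x]
          exact Bool.or_comm _ _
    · -- base case: m = 0, so m+1 = 1
      have hm0 : m = 0 := by omega
      subst hm0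
      refine ⟨d0, ?_, hd0⟩
      simp [PySem.List.pyRange_one_eq_nil]

theorem scnt_one (cs : List Char) (h : cs ≠ []) : scnt cs 1 = 1 := by
  cases cs with
  | nil => simp at h
  | cons c t => simp [scnt, PySem.Set.ofList]

theorem replicate_eq_map_range (cs : List Char) (h : cs ≠ []) (n : ℕ) :
    List.replicate n (1:Int) = (List.range n).map (fun i => if i < 1 then scnt cs (i+1) else 1) := by
  apply List.ext_getElem
  · simp
  · intro k hk1 hk2
    simp only [List.getElem_replicate, List.getElem_map, List.getElem_range]
    rcases Nat.eq_zero_or_pos k with h0 | h0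
    · subst h0; simp [scnt_one cs h]
    · have : ¬ k < 1 := by omega
      simp [this]

theorem distinctCharacter_A_eq (S : String) (len : Int)
    (h1 : S.toList ≠ []) (h2 : len ≤ (S.toList.length : Int)) :
    distinctCharacter S len =
      (List.range len.toNat).map (fun i => scnt S.toList (i+1)) := by
  have hlen0 : 0 < S.toList.length := List.length_pos_of_ne_nil h1
  have hget0 : PySem.Str.pyGet? S 0 = some (S.toList[0]'hlen0) := by
    simp [PySem.Str.pyGet?, PySem.List.pyGet?_zero, List.getElem?_eq_getElem hlen0]
  unfold distinctCharacter
  rw [hget0]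
  by_cases hneg : len ≤ 0
  · have : len.toNat = 0 := by omega
    simp [this, PySem.List.pyRange_one_eq_nil (by omega : len ≤ 1)]
  · obtain ⟨n, hlen⟩ : ∃ n : ℕ, len = (n : Int) := ⟨len.toNat, by omega⟩
    subst hlen
    have hnn : n ≤ S.toList.length := by exact_mod_cast h2
    have hd0 : ∀ x, (PySem.Dict.insert PySem.Dict.empty (S.toList[0]'hlen0) (1:Int)).contains x
        = (S.toList.take 1).contains x := by
      intro x
      rw [PySem.Dict.contains_insert]
      have e : S.toList.take 1 = [S.toList[0]'hlen0] := by
        rw [show (1:ℕ) = 0 + 1 from rfl, ← List.take_concat_get hlen0]; simp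
      rw [e]
      by_cases hx : x = S.toList[0]'hlen0 <;> simp [hx]
    obtain ⟨d, hfold, _⟩ := A_loop S n hnn n (by omega) (by omega)
      (PySem.Dict.insert PySem.Dict.empty (S.toList[0]'hlen0) 1) hd0
    simp only [Int.toNat_natCast]
    rw [replicate_eq_map_range S.toList h1 n, hfold]
    simp only []
    apply List.map_congr_left
    intro i hi
    simp only [List.mem_range] at hi
    simp [hi]

def indf (cs : List Char) (i : ℕ) : Int := scnt cs (i+1) - scnt cs i

theorem replicate_zero_eq_map_range (g : ℕ → Int) (n : ℕ) :
    List.replicate n (0:Int) = (List.range n).map (fun i => if i < 0 then g i else 0) := by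
  apply List.ext_getElem <;> simp

theorem B_loop1 (S : String) (n : ℕ) (hn : n ≤ S.toList.length) :
    ∀ m : ℕ, m ≤ n →
    ∃ s : PySem.Set Char,
      (PySem.List.pyRange 0 (m : Int) 1).foldl
        (fun (st : List Int × PySem.Set Char) i =>
          match PySem.Str.pyGet? S i with
          | none => st
          | some c =>
            if PySem.Set.contains st.2 c = false then
              (PySem.List.pySetD st.1 i 1, PySem.Set.add st.2 c)
            else st)
        (List.replicate n 0, PySem.Set.empty)
      = ((List.range n).map (fun i => if i < m then indf S.toList i else 0), s)
      ∧ ∀ x, PySem.Set.contains s x = (S.toList.take m).contains x := by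
  intro m
  induction m with
  | zero =>
    intro _
    refine ⟨PySem.Set.empty, ?_, ?_⟩
    · rw [PySem.List.pyRange_one_eq_nil (by omega)]
      simp only [List.foldl_nil]
      rw [← replicate_zero_eq_map_range]
    · intro x; simp [PySem.Set.empty, PySem.Set.contains]
  | succ m ih =>
    intro hm
    obtain ⟨s, hfold, hs⟩ := ih (by omega)
    have hrange : PySem.List.pyRange 0 ((m+1 : ℕ) : Int) 1
        = PySem.List.pyRange 0 (m : Int) 1 ++ [(m : Int)] := by
      push_cast
      exact PySem.List.pyRange_one_succ_right (by positivity)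
    rw [hrange, List.foldl_append, hfold]
    have hmlt : m < S.toList.length := by omega
    have hget : PySem.Str.pyGet? S ((m : ℕ) : Int) = some (S.toList[m]) := by
      simp [List.getElem?_eq_getElem hmlt]
    simp only [List.foldl_cons, List.foldl_nil, hget]
    by_cases hc : S.toList[m] ∈ S.toList.take m
    · -- already seen: state unchanged
      have hcb : PySem.Set.contains s S.toList[m] = true := by
        rw [hs]; simp [hc]
      rw [hcb, if_neg (by simp)]
      refine ⟨s, ?_, ?_⟩
      · congr 1
        apply List.map_congr_left
        intro i hi
        simp only [List.mem_range] at hi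
        rcases lt_trichotomy i m with h | h | h
        · simp [h, Nat.lt_succ_of_lt h]
        · subst h
          have : indf S.toList i = 0 := by
            unfold indf; rw [scnt_succ S.toList i hmlt]; simp [hc]
          simp [this]
        · have g1 : ¬ i < m := by omega
          have g2 : ¬ i < m + 1 := by omega
          simp [g1, g2]
      · intro x
        rw [hs, contains_take_succ S.toList m hmlt x]
        cases hx : (x == S.toList[m])
        · simp
        · have hx' : x = S.toList[m] := by simpa using hx
          subst hx'
          simp [hc]
    · -- new character
      have hcb : PySem.Set.contains s S.toList[m] = false := by
        rw [hs]; simp [hc]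
      rw [hcb, if_pos rfl]
      refine ⟨PySem.Set.add s S.toList[m], ?_, ?_⟩
      · rw [PySem.List.pySetD_natCast]
        rw [step_set n m (by omega) _ 0 _ (by unfold indf; rw [scnt_succ S.toList m hmlt]; simp [hc])]
      · intro x
        rw [contains_take_succ S.toList m hmlt x, ← hs]
        unfold PySem.Set.add
        rw [hcb]
        simp only [Bool.false_eq_true, if_false]
        by_cases hx : x = S.toList[m] <;> simp [PySem.Set.contains, hx]

theorem B_loop2 (cs : List Char) (n : ℕ) (ind : List Int)
    (hind : ∀ k : ℕ, k < n → PySem.List.pyGetD ind (k : Int) 0 = indf cs k) :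
    ∀ m : ℕ, m ≤ n →
    (PySem.List.pyRange 0 (m : Int) 1).foldl
      (fun (rt : List Int × Int) i =>
        (PySem.List.pySetD rt.1 i (rt.2 + PySem.List.pyGetD ind i 0),
         rt.2 + PySem.List.pyGetD ind i 0))
      (List.replicate n 0, 0)
    = ((List.range n).map (fun i => if i < m then scnt cs (i+1) else 0), scnt cs m) := by
  intro m
  induction m with
  | zero =>
    intro _
    rw [PySem.List.pyRange_one_eq_nil (by omega)]
    simp only [List.foldl_nil]
    rw [← replicate_zero_eq_map_range]
    simp [scnt]
  | succ m ih =>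
    intro hm
    have hrange : PySem.List.pyRange 0 ((m+1 : ℕ) : Int) 1
        = PySem.List.pyRange 0 (m : Int) 1 ++ [(m : Int)] := by
      push_cast
      exact PySem.List.pyRange_one_succ_right (by positivity)
    rw [hrange, List.foldl_append, ih (by omega)]
    simp only [List.foldl_cons, List.foldl_nil]
    rw [hind m (by omega)]
    have ht : scnt cs m + indf cs m = scnt cs (m+1) := by unfold indf; ring
    rw [ht, PySem.List.pySetD_natCast,
        step_set n m (by omega) _ 0 _ rfl]

theorem distinctCharacter_B_eq (S : String) (len : Int)
    (h2 : len ≤ (S.toList.length : Int)) :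
    distinctCharacter_alt S len =
      (List.range len.toNat).map (fun i => scnt S.toList (i+1)) := by
  unfold distinctCharacter_alt
  by_cases hneg : len ≤ 0
  · have : len.toNat = 0 := by omega
    simp [this, PySem.List.pyRange_one_eq_nil (by omega : len ≤ 0)]
  · obtain ⟨n, hlen⟩ : ∃ n : ℕ, len = (n : Int) := ⟨len.toNat, by omega⟩
    subst hlen
    have hnn : n ≤ S.toList.length := by exact_mod_cast h2
    obtain ⟨s, hfold1, _⟩ := B_loop1 S n hnn n (by omega)
    simp only [Int.toNat_natCast]
    rw [hfold1]
    simp only []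
    have hind : ∀ k : ℕ, k < n →
        PySem.List.pyGetD ((List.range n).map (fun i => if i < n then indf S.toList i else 0)) (k : Int) 0
        = indf S.toList k := by
      intro k hk
      rw [PySem.List.pyGetD_natCast, getD_map_range' n k hk]
      simp [hk]
    rw [B_loop2 S.toList n _ hind n (by omega)]
    simp only []
    apply List.map_congr_left
    intro i hi
    simp only [List.mem_range] at hi
    simp [hi]

-- ===== VERDICT (by name: the statement is the Claim_ definition above) =====
theorem distinctCharacter_spec : Claim_equal_distinctCharacter := by
  intro S len _ hpre
  unfold Spec_distinctCharacter
  rw [distinctCharacter_A_eq S len hpre.1 hpre.2, distinctCharacter_B_eq S len hpre.2]
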